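-- pv_equiv track=rewrite | github.com/LuckyAndrey112/mpsiem_statpy | styles_elasticv2.py | generate_cell_addr
-- ===== SOURCE A (Python) =====
-- def generate_cell_addr(Numb):
--     if Numb<1:
--         return ''
--     alfavit = ['Z','A','B',"C",'D','E','F','G','H','I',"J",'K',"L",'M','N','O','P','Q','R','S','T','U','V','W','X','Y']
--     ost = alfavit[Numb%26]
--     if (Numb//26)>0: #and not(((Numb//26)==1) and (Numb%26 == 0))
--         if ost=='Z':
--             ost = generate_cell_addr((Numb//26)-1)+ost
--         else:
--             ost = generate_cell_addr((Numb//26))+ost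
--     return ost
-- ===== SOURCE B (Python) =====
-- def generate_cell_addr(Numb):
--     if Numb < 1:
--         return ''
--     n = Numb
--     result = ''
--     while n >= 1:
--         rem = n % 26
--         result = ('Z' if rem == 0 else chr(64 + rem)) + result
--         q = n // 26
--         if q == 0:
--             break
--         n = q - 1 if rem == 0 else q
--     return result
-- ===== Notes on version B (the rewrite author's own statement) =====
-- stated objective: idiomatic
-- what changed: Replaced A's recursive string-building (with a magic Z-first alphabet list) by an iterative while-loop that prepends the letter computed from the remainder via chr() and carries the Z-borrow in the loop state.
import Mathlib
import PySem

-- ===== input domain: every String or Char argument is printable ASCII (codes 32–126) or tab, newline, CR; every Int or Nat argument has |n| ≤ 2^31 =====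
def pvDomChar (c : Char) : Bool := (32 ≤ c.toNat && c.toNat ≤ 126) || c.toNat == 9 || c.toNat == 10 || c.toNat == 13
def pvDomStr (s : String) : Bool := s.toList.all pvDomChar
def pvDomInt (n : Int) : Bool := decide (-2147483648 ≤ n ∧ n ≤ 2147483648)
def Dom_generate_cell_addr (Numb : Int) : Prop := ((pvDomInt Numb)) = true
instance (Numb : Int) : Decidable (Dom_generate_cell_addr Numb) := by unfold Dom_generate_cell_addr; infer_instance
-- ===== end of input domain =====

-- B replaces A's recursion by an iterative while-loop building the string back-to-front (idiomatic decomposition; same cost).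

-- ===== PORT A =====
-- A's list of one-character strings, as List Char entries (strings are kept as List Char
-- internally because Lean's String.append is opaque to the kernel; String.ofList wraps at the top).
def pvAlfavit : List (List Char) :=
  [['Z'],['A'],['B'],['C'],['D'],['E'],['F'],['G'],['H'],['I'],['J'],['K'],['L'],
   ['M'],['N'],['O'],['P'],['Q'],['R'],['S'],['T'],['U'],['V'],['W'],['X'],['Y']]

-- literal transliteration of A's recursion (ost, the // and % via PySem; index always in range so getD [] is never the default)
def pvCoreA (Numb : Int) : List Char :=
  if Numb < 1 then []
  else
    let ost := (PySem.List.pyGet? pvAlfavit (PySem.Int.mod Numb 26)).getD []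
    if PySem.Int.floordiv Numb 26 > 0 then
      if ost = ['Z'] then pvCoreA (PySem.Int.floordiv Numb 26 - 1) ++ ost
      else pvCoreA (PySem.Int.floordiv Numb 26) ++ ost
    else ost
termination_by Numb.toNat
decreasing_by
  all_goals
    rw [PySem.Int.floordiv_eq_ediv_of_pos (by norm_num : (0:Int) < 26)] at *
    omega

def generate_cell_addr (Numb : Int) : String := String.ofList (pvCoreA Numb)

-- ===== PORT B =====
-- the while-loop of Source B: state (n, result); guard n ≥ 1 at the top, break when the quotient is 0
def pvLoopB (n : Int) (result : List Char) : List Char :=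
  if n < 1 then result
  else
    let rem := PySem.Int.mod n 26
    let result := (if rem = 0 then ['Z'] else [Char.ofNat (64 + rem).toNat]) ++ result
    let q := PySem.Int.floordiv n 26
    if q = 0 then result
    else pvLoopB (if rem = 0 then q - 1 else q) result
termination_by n.toNat
decreasing_by
  rw [PySem.Int.floordiv_eq_ediv_of_pos (by norm_num : (0:Int) < 26)] at *
  split <;> omega

def generate_cell_addr_alt (Numb : Int) : String :=
  if Numb < 1 then "" else String.ofList (pvLoopB Numb [])

-- ===== PRECONDITION & SPEC =====
def Spec_generate_cell_addr (Numb : Int) (out : String) : Prop := out = generate_cell_addr_alt Numb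
instance (Numb : Int) (out : String) : Decidable (Spec_generate_cell_addr Numb out) := by unfold Spec_generate_cell_addr; infer_instance

-- ===== CLAIM (what is proved, stated in full; the proofs are below) =====
def Claim_equal_generate_cell_addr : Prop := ∀ (Numb : Int), Dom_generate_cell_addr Numb → Spec_generate_cell_addr Numb (generate_cell_addr Numb)

-- ===== LEMMAS AND PROOFS =====

-- the alphabet entry at r is 'Z' for r = 0 and chr(64+r) otherwise
lemma pvAlfa_get (r : Int) (h0 : 0 ≤ r) (h1 : r < 26) :
    (PySem.List.pyGet? pvAlfavit r).getD [] =
      (if r = 0 then ['Z'] else [Char.ofNat (64 + r).toNat]) := by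
  interval_cases r <;> decide

-- chr(64+r) is never 'Z' for 0 < r < 26
lemma pvChr_ne_Z (r : Int) (h0 : 0 < r) (h1 : r < 26) : Char.ofNat (64 + r).toNat ≠ 'Z' := by
  interval_cases r <;> decide

lemma pvCoreA_of_lt (n : Int) (h : n < 1) : pvCoreA n = [] := by
  rw [pvCoreA]; simp [h]

lemma pvLoopB_of_lt (n : Int) (res : List Char) (h : n < 1) : pvLoopB n res = res := by
  rw [pvLoopB]; simp [h]

-- loop invariant: the iterative loop computes A's recursion in front of the accumulator
lemma pvLoopB_eq_core : ∀ (k : Nat) (n : Int), n.toNat ≤ k →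
    ∀ res : List Char, pvLoopB n res = pvCoreA n ++ res := by
  intro k
  induction k with
  | zero =>
    intro n hk res
    have hn : n < 1 := by omega
    rw [pvLoopB_of_lt n res hn, pvCoreA_of_lt n hn]; simp
  | succ k ih =>
    intro n hk res
    by_cases hn : n < 1
    · rw [pvLoopB_of_lt n res hn, pvCoreA_of_lt n hn]; simp
    · rw [pvLoopB, pvCoreA]
      simp only [if_neg hn]
      have hmod : PySem.Int.mod n 26 = n % 26 :=
        PySem.Int.mod_eq_emod_of_pos (by norm_num)
      have hdiv : PySem.Int.floordiv n 26 = n / 26 :=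
        PySem.Int.floordiv_eq_ediv_of_pos (by norm_num)
      have hr0 : 0 ≤ n % 26 := by omega
      have hr1 : n % 26 < 26 := by omega
      rw [hmod, hdiv, pvAlfa_get (n % 26) hr0 hr1]
      by_cases hq : n / 26 = 0
      · simp [hq]
      · have hqpos : 0 < n / 26 := by omega
        simp only [if_pos hqpos, if_neg hq]
        by_cases hr : n % 26 = 0
        · simp only [hr, reduceIte]
          rw [ih (n / 26 - 1) (by omega) (['Z'] ++ res)]
          simp
        · simp only [if_neg hr]
          rw [if_neg (show [Char.ofNat (64 + n % 26).toNat] ≠ ['Z'] from by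
            simpa using pvChr_ne_Z (n % 26) (by omega) hr1)]
          rw [ih (n / 26) (by omega) ([Char.ofNat (64 + n % 26).toNat] ++ res)]
          simp

-- ===== VERDICT (by name: the statement is the Claim_ definition above) =====
theorem generate_cell_addr_spec : Claim_equal_generate_cell_addr := by
  intro Numb _
  unfold Spec_generate_cell_addr generate_cell_addr generate_cell_addr_alt
  by_cases h : Numb < 1
  · rw [if_pos h, pvCoreA_of_lt Numb h]
  · rw [if_neg h, pvLoopB_eq_core Numb.toNat Numb le_rfl []]
    simp
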